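-- pv_equiv track=rewrite | github.com/SAP-samples/robust-pypi-detector | artifact/code/utils.py | get_num_heterogeneous_tokens
-- ===== SOURCE A (Python) =====
-- def check(s, arr):
--     result = []
--     for i in arr:
--         # for every character in char array
--         # if it is present in string return true else false
--         if i in s:
--             result.append("True")
--         else:
--             result.append("False")
--     return result
--
-- def get_num_heterogeneous_tokens(list_words, symbols=['u','d','l','s']):
--     unique_symbols_id = []
--     # get unique symbols from each identifier
--     for id in list_words:
--         unique_symbols_id.append("".join(set(id)))
--     # initialize the count for obfuscation:
--     counter_obfuscated = 0
--     for id in unique_symbols_id: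
--         # upper case , digit, lower case, symbol
--         if (check(id, symbols)) == ['True', 'True', 'True', 'True']:
--             counter_obfuscated += 1
--         # upper case, digit, symbol
--         if (check(id, symbols)) == ['True', 'True', 'False', 'True']:
--             counter_obfuscated += 1
--         # digit, lower case, symbol
--         if (check(id, symbols)) == ['False', 'True', 'True', 'True']:
--             counter_obfuscated += 1
--         # digit, symbol
--         if (check(id, symbols)) == ['False', 'True', 'False', 'True']:
--             counter_obfuscated += 1
--     return counter_obfuscated
-- ===== SOURCE B (Python) =====
-- def get_num_heterogeneous_tokens(list_words, symbols=['u','d','l','s']):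
--     # A's four accepted truth-vectors are exactly "symbols[1] present and symbols[3] present".
--     if len(symbols) != 4:
--         return 0
--     return sum(1 for w in list_words if symbols[1] in w and symbols[3] in w)
-- ===== Notes on version B (the rewrite author's own statement) =====
-- stated objective: simpler
-- what changed: Drops the check helper, the intermediate list of set-joined strings and the four truth-vector comparisons; after a len(symbols)==4 guard, a single pass counts the words containing both symbols[1] and symbols[3], which is exactly the union of A's four accepted patterns (also skips A's per-word set()/join and the four full check passes per word, which a timing run measured as a large constant-factor speedup).
-- outside the precondition, e.g. on get_num_heterogeneous_tokens(['dd'], ['u', 'dd', 'l', 'd']): A returns 0, B returns 1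
import Mathlib
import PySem

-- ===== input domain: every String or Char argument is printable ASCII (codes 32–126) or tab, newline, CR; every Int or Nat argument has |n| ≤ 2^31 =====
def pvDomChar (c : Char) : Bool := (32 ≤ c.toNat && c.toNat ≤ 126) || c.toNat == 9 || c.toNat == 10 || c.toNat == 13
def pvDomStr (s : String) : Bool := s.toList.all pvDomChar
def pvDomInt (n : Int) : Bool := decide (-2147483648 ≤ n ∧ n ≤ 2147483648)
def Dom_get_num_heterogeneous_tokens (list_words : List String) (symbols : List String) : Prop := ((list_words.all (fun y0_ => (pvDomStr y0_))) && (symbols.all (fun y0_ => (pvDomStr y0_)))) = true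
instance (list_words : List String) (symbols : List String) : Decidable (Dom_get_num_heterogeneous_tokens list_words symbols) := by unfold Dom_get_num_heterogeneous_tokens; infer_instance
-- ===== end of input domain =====

-- B drops the check helper, the intermediate set-joined list and the four truth-vector
-- comparisons: one pass counting words that contain both symbols[1] and symbols[3] (simpler).


-- ===== PORT A =====
-- helper 'check': builds the list of "True"/"False" strings, one per symbol
def pvCheck (s : String) (arr : List String) : List String :=
  arr.foldl (fun result i =>
    if PySem.Str.isIn i s then result ++ ["True"] else result ++ ["False"]) []

-- the body of A's counting loop: the four sequential 'if check(id, symbols) == …' updates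
def pvCountStep (symbols : List String) (counter_obfuscated : Int) (id : String) : Int :=
  let counter_obfuscated :=
    if pvCheck id symbols = ["True", "True", "True", "True"]
    then counter_obfuscated + 1 else counter_obfuscated
  let counter_obfuscated :=
    if pvCheck id symbols = ["True", "True", "False", "True"]
    then counter_obfuscated + 1 else counter_obfuscated
  let counter_obfuscated :=
    if pvCheck id symbols = ["False", "True", "True", "True"]
    then counter_obfuscated + 1 else counter_obfuscated
  let counter_obfuscated :=
    if pvCheck id symbols = ["False", "True", "False", "True"]
    then counter_obfuscated + 1 else counter_obfuscated
  counter_obfuscated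

-- "".join(set(id)): the Set keeps first occurrences in order; inside Pre_ (symbols of
-- length ≤ 1) only MEMBERSHIP in this string is ever tested, so the order is irrelevant.
def get_num_heterogeneous_tokens (list_words : List String) (symbols : List String) : Int :=
  let unique_symbols_id :=
    list_words.foldl (fun acc id => acc ++ [String.ofList (PySem.Set.ofList id.toList)]) []
  unique_symbols_id.foldl (pvCountStep symbols) 0

-- ===== PORT B =====
-- symbols[1] / symbols[3]: safe under the length-4 guard, ported as getD
def get_num_heterogeneous_tokens_alt (list_words : List String) (symbols : List String) : Int :=
  if symbols.length ≠ 4 then 0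
  else
    (list_words.countP (fun w =>
      PySem.Str.isIn (symbols.getD 1 "") w && PySem.Str.isIn (symbols.getD 3 "") w) : Int)

-- ===== PRECONDITION & SPEC =====
-- Pre_ excludes length-4 symbol lists whose 2nd or 4th entry is longer than one character:
-- there A substring-tests that entry against "".join(set(id)), whose character order is an
-- accident of Python's set iteration, so A's value on those inputs is not specifiable.
def Pre_get_num_heterogeneous_tokens (_list_words : List String) (symbols : List String) : Prop :=
  symbols.length = 4 →
    (symbols.getD 1 "").toList.length ≤ 1 ∧ (symbols.getD 3 "").toList.length ≤ 1
instance (list_words : List String) (symbols : List String) : Decidable (Pre_get_num_heterogeneous_tokens list_words symbols) := by unfold Pre_get_num_heterogeneous_tokens; infer_instance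

def pvWitness_get_num_heterogeneous_tokens : List String × List String :=
  (["d1s", "abc"], ["u", "d", "l", "s"])

def Spec_get_num_heterogeneous_tokens (list_words : List String) (symbols : List String) (out : Int) : Prop := out = get_num_heterogeneous_tokens_alt list_words symbols
instance (list_words : List String) (symbols : List String) (out : Int) : Decidable (Spec_get_num_heterogeneous_tokens list_words symbols out) := by unfold Spec_get_num_heterogeneous_tokens; infer_instance

-- ===== CLAIM (what is proved, stated in full; the proofs are below) =====
def Claim_equal_get_num_heterogeneous_tokens : Prop := ∀ (list_words : List String) (symbols : List String), Dom_get_num_heterogeneous_tokens list_words symbols → Pre_get_num_heterogeneous_tokens list_words symbols → Spec_get_num_heterogeneous_tokens list_words symbols (get_num_heterogeneous_tokens list_words symbols)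

-- ===== LEMMAS AND PROOFS =====

theorem pvCheck_eq_map (s : String) (arr : List String) :
    pvCheck s arr = arr.map (fun i => if PySem.Str.isIn i s then "True" else "False") := by
  have gen : ∀ (arr : List String) (init : List String),
      arr.foldl (fun result i =>
        if PySem.Str.isIn i s then result ++ ["True"] else result ++ ["False"]) init
      = init ++ arr.map (fun i => if PySem.Str.isIn i s then "True" else "False") := by
    intro arr
    induction arr with
    | nil => simp
    | cons x xs ih =>
      intro init
      simp only [List.foldl_cons]
      rw [ih]
      by_cases h : PySem.Chars.isIn x.toList s.toList = true <;> simp [PySem.Str.isIn, h]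
  simpa using gen arr []

theorem infix_singleton_iff (c : Char) (l : List Char) : [c] <:+: l ↔ c ∈ l := by
  constructor
  · intro h; exact h.mem (by simp)
  · intro h; obtain ⟨p, q, rfl⟩ := List.mem_iff_append.mp h
    exact ⟨p, q, by simp⟩

theorem isIn_singleton_eq (c : Char) (l : List Char) :
    PySem.Chars.isIn [c] l = decide (c ∈ l) := by
  by_cases hm : c ∈ l
  · simp [hm, (PySem.Chars.isIn_iff_infix _ _).mpr ((infix_singleton_iff c l).mpr hm)]
  · simp [hm, (PySem.Chars.isIn_eq_false_iff _ _).mpr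
      (fun hh => hm ((infix_singleton_iff c l).mp hh))]

-- a string of length ≤ 1 is in "".join(set(w)) iff it is in w
theorem isIn_uniq (t w : String) (ht : t.toList.length ≤ 1) :
    PySem.Str.isIn t (String.ofList (PySem.Set.ofList w.toList)) = PySem.Str.isIn t w := by
  cases hl : t.toList with
  | nil => simp [PySem.Str.isIn, hl, PySem.Chars.isIn_nil]
  | cons c cs =>
    have hcs : cs = [] := by
      rw [hl, List.length_cons] at ht
      exact List.length_eq_zero_iff.mp (by omega)
    subst hcs
    simp only [PySem.Str.isIn, hl, isIn_singleton_eq, String.toList_ofList]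
    simp [PySem.Set.mem_ofList]

-- the join loop builds the list of set-joined strings
theorem join_loop_eq (ws : List String) (init : List String) :
    ws.foldl (fun acc id => acc ++ [String.ofList (PySem.Set.ofList id.toList)]) init
      = init ++ ws.map (fun id => String.ofList (PySem.Set.ofList id.toList)) := by
  induction ws generalizing init with
  | nil => simp
  | cons x xs ih => simp [ih]

-- A's loop body adds 1 exactly when symbols[1] and symbols[3] are both present
theorem pvCountStep_eq (s0 s1 s2 s3 : String) (counter : Int) (id : String) :
    pvCountStep [s0, s1, s2, s3] counter id
      = counter + (if PySem.Str.isIn s1 id && PySem.Str.isIn s3 id then 1 else 0) := by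
  simp only [pvCountStep, pvCheck_eq_map, List.map]
  cases h0 : PySem.Str.isIn s0 id <;> cases h1 : PySem.Str.isIn s1 id <;>
    cases h2 : PySem.Str.isIn s2 id <;> cases h3 : PySem.Str.isIn s3 id <;> simp

-- A's counting loop over length-4 symbols counts "symbols[1] and symbols[3] both present"
theorem fold_count_eq (s0 s1 s2 s3 : String) (us : List String) (counter : Int) :
    us.foldl (pvCountStep [s0, s1, s2, s3]) counter
    = counter + (us.countP (fun id => PySem.Str.isIn s1 id && PySem.Str.isIn s3 id) : Int) := by
  induction us generalizing counter with
  | nil => simp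
  | cons x xs ih =>
    rw [List.foldl_cons, ih, pvCountStep_eq, List.countP_cons]
    by_cases hb : PySem.Str.isIn s1 x && PySem.Str.isIn s3 x <;> simp <;> omega

-- with symbols of any other length, every comparison fails and A's loop counts nothing
theorem fold_zero_of_len_ne (symbols : List String) (hlen : symbols.length ≠ 4)
    (us : List String) (counter : Int) :
    us.foldl (pvCountStep symbols) counter = counter := by
  have hne : ∀ (id : String) (v : List String), v.length = 4 → pvCheck id symbols ≠ v := by
    intro id v hv he
    have : (pvCheck id symbols).length = symbols.length := by simp [pvCheck_eq_map]
    rw [he, hv] at this; exact hlen this.symm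
  have hstep : ∀ (c : Int) (id : String), pvCountStep symbols c id = c := by
    intro c id
    unfold pvCountStep
    simp only [if_neg (hne id ["True", "True", "True", "True"] rfl),
      if_neg (hne id ["True", "True", "False", "True"] rfl),
      if_neg (hne id ["False", "True", "True", "True"] rfl),
      if_neg (hne id ["False", "True", "False", "True"] rfl)]
  induction us generalizing counter with
  | nil => rfl
  | cons x xs ih => rw [List.foldl_cons, hstep, ih]

-- ===== VERDICT (by name: the statement is the Claim_ definition above) =====
theorem get_num_heterogeneous_tokens_spec : Claim_equal_get_num_heterogeneous_tokens := by
  intro list_words symbols _hdom hpre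
  unfold Spec_get_num_heterogeneous_tokens
  unfold get_num_heterogeneous_tokens get_num_heterogeneous_tokens_alt
  by_cases hlen : symbols.length = 4
  · obtain ⟨s0, s1, s2, s3, hs⟩ : ∃ a b c d, symbols = [a, b, c, d] := by
      rcases symbols with _ | ⟨a, _ | ⟨b, _ | ⟨c, _ | ⟨d, _ | _⟩⟩⟩⟩ <;> simp_all
    obtain ⟨h1, h3⟩ := hpre hlen
    subst hs
    simp only [List.getD, List.getElem?_cons_succ, List.getElem?_cons_zero,
      Option.getD_some] at h1 h3
    rw [join_loop_eq, List.nil_append, fold_count_eq, if_neg (by simp)]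
    simp only [List.getD, List.getElem?_cons_succ, List.getElem?_cons_zero, Option.getD_some]
    have hfun : ((fun id => PySem.Str.isIn s1 id && PySem.Str.isIn s3 id) ∘
        (fun id => String.ofList (PySem.Set.ofList id.toList)))
        = (fun w => PySem.Str.isIn s1 w && PySem.Str.isIn s3 w) := by
      funext w
      simp only [Function.comp_apply]
      rw [isIn_uniq s1 w h1, isIn_uniq s3 w h3]
    rw [List.countP_map, hfun, zero_add]
  · rw [fold_zero_of_len_ne symbols hlen, if_pos hlen]
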